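-- pv_equiv track=rewrite | github.com/Behzadnazar/orchestrator_control_plane_v1 | scripts/artifact_index.py | build_status_summary
-- ===== SOURCE A (Python) =====
-- from typing import Any
--
-- def build_status_summary(runs: list[dict[str, Any]]) -> dict[str, Any]:
--     summary = {
--         "total_runs": len(runs),
--         "passed_runs": 0,
--         "failed_runs": 0,
--         "preflight_failed_runs": 0,
--     }
--
--     for run in runs:
--         status = run.get("status")
--         if status == "passed":
--             summary["passed_runs"] += 1
--         elif status == "preflight_failed":
--             summary["preflight_failed_runs"] += 1
--         else:
--             summary["failed_runs"] += 1
--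
--     return summary
-- ===== SOURCE B (Python) =====
-- def build_status_summary(runs):
--     passed = sum(1 for run in runs if run.get("status") == "passed")
--     preflight = sum(1 for run in runs if run.get("status") == "preflight_failed")
--     return {
--         "total_runs": len(runs),
--         "passed_runs": passed,
--         "failed_runs": len(runs) - passed - preflight,
--         "preflight_failed_runs": preflight,
--     }
-- ===== Notes on version B (the rewrite author's own statement) =====
-- stated objective: simpler
-- what changed: Replaces the per-element if/elif/else counting loop with two direct filter-counts (passed, preflight_failed) and derives failed_runs by subtraction from len(runs).
import Mathlib
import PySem

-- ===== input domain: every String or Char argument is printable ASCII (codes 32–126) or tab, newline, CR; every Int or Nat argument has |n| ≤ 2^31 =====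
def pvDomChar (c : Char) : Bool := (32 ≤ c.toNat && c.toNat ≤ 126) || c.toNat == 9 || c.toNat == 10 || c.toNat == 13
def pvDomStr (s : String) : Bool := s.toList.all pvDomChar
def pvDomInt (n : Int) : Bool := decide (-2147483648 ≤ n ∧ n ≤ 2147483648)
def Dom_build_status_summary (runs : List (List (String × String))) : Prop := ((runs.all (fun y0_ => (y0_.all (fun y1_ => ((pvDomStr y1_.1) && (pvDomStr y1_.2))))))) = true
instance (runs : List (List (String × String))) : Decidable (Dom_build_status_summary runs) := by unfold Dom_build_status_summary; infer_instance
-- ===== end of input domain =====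

-- B replaces A's if/elif/else counting loop with two filter-counts and a subtraction for failed_runs (simpler decomposition, same O(n) cost).


-- ===== PORT A =====
-- the body of A's for-loop: one run updates the summary dict
def pvStepA (d : PySem.Dict String Int) (run : List (String × String)) : PySem.Dict String Int :=
  let status := (PySem.Dict.mk run).get? "status"   -- run.get("status")
  if status = some "passed" then d.modify "passed_runs" 0 (· + 1)
  else if status = some "preflight_failed" then d.modify "preflight_failed_runs" 0 (· + 1)
  else d.modify "failed_runs" 0 (· + 1)

def build_status_summary (runs : List (List (String × String))) : List (String × Int) :=
  let summary : PySem.Dict String Int :=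
    ((((PySem.Dict.empty).insert "total_runs" (runs.length : Int)).insert
        "passed_runs" 0).insert "failed_runs" 0).insert "preflight_failed_runs" 0
  let summary := runs.foldl pvStepA summary
  summary.items

-- ===== PORT B =====
def build_status_summary_alt (runs : List (List (String × String))) : List (String × Int) :=
  let passed : Int := (runs.countP (fun run => (PySem.Dict.mk run).get? "status" == some "passed") : Nat)
  let preflight : Int := (runs.countP (fun run => (PySem.Dict.mk run).get? "status" == some "preflight_failed") : Nat)
  [("total_runs", (runs.length : Int)),
   ("passed_runs", passed),
   ("failed_runs", (runs.length : Int) - passed - preflight),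
   ("preflight_failed_runs", preflight)]

-- ===== PRECONDITION & SPEC =====
def Spec_build_status_summary (runs : List (List (String × String))) (out : List (String × Int)) : Prop := out = build_status_summary_alt runs
instance (runs : List (List (String × String))) (out : List (String × Int)) : Decidable (Spec_build_status_summary runs out) := by unfold Spec_build_status_summary; infer_instance

-- ===== CLAIM (what is proved, stated in full; the proofs are below) =====
def Claim_equal_build_status_summary : Prop := ∀ (runs : List (List (String × String))), Dom_build_status_summary runs → Spec_build_status_summary runs (build_status_summary runs)

-- ===== LEMMAS AND PROOFS =====

-- the concrete four-key summary dict A's loop maintains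
def pvSum (t p f q : Int) : PySem.Dict String Int :=
  PySem.Dict.mk [("total_runs", t), ("passed_runs", p), ("failed_runs", f), ("preflight_failed_runs", q)]

lemma pvSum_init (t : Int) :
    ((((PySem.Dict.empty).insert "total_runs" t).insert
        "passed_runs" 0).insert "failed_runs" 0).insert "preflight_failed_runs" 0
      = pvSum t 0 0 0 := rfl

lemma pvStepA_passed {r : List (String × String)} (h : (PySem.Dict.mk r).get? "status" = some "passed")
    (t p f q : Int) : pvStepA (pvSum t p f q) r = pvSum t (p + 1) f q := by
  unfold pvStepA
  rw [h]
  rfl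

lemma pvStepA_pf {r : List (String × String)} (h : (PySem.Dict.mk r).get? "status" = some "preflight_failed")
    (t p f q : Int) : pvStepA (pvSum t p f q) r = pvSum t p f (q + 1) := by
  unfold pvStepA
  rw [h]
  rfl

lemma pvStepA_failed {r : List (String × String)} (h1 : ¬ (PySem.Dict.mk r).get? "status" = some "passed")
    (h2 : ¬ (PySem.Dict.mk r).get? "status" = some "preflight_failed")
    (t p f q : Int) : pvStepA (pvSum t p f q) r = pvSum t p (f + 1) q := by
  unfold pvStepA
  rw [if_neg h1, if_neg h2]
  rfl

-- A's loop, starting from any counter state, adds the two filter-counts and the remainder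
lemma pvLoop (runs : List (List (String × String))) : ∀ (t p f q : Int),
    runs.foldl pvStepA (pvSum t p f q)
    = pvSum t
        (p + (runs.countP (fun run => (PySem.Dict.mk run).get? "status" == some "passed") : Nat))
        (f + ((runs.length : Int)
              - (runs.countP (fun run => (PySem.Dict.mk run).get? "status" == some "passed") : Nat)
              - (runs.countP (fun run => (PySem.Dict.mk run).get? "status" == some "preflight_failed") : Nat)))
        (q + (runs.countP (fun run => (PySem.Dict.mk run).get? "status" == some "preflight_failed") : Nat)) := by
  induction runs with
  | nil => intro t p f q; simp
  | cons r rs ih =>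
    intro t p f q
    by_cases h1 : (PySem.Dict.mk r).get? "status" = some "passed"
    · have e1 : ((PySem.Dict.mk r).get? "status" == some "passed") = true := by simp [h1]
      have e2 : ((PySem.Dict.mk r).get? "status" == some "preflight_failed") = false := by simp [h1]
      rw [List.foldl_cons, pvStepA_passed h1, ih]
      simp only [pvSum, List.countP_cons, List.length_cons, e1, e2, PySem.Dict.mk.injEq,
        List.cons.injEq, Prod.mk.injEq, true_and, and_true]
      refine ⟨by push_cast; ring, by push_cast; ring, by push_cast; ring⟩
    · by_cases h2 : (PySem.Dict.mk r).get? "status" = some "preflight_failed"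
      · have e1 : ((PySem.Dict.mk r).get? "status" == some "passed") = false := by simp [h1]
        have e2 : ((PySem.Dict.mk r).get? "status" == some "preflight_failed") = true := by simp [h2]
        rw [List.foldl_cons, pvStepA_pf h2, ih]
        simp only [pvSum, List.countP_cons, List.length_cons, e1, e2, PySem.Dict.mk.injEq,
          List.cons.injEq, Prod.mk.injEq, true_and, and_true]
        refine ⟨by push_cast; ring, by push_cast; ring, by push_cast; ring⟩
      · have e1 : ((PySem.Dict.mk r).get? "status" == some "passed") = false := by simp [h1]
        have e2 : ((PySem.Dict.mk r).get? "status" == some "preflight_failed") = false := by simp [h2]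
        rw [List.foldl_cons, pvStepA_failed h1 h2, ih]
        simp only [pvSum, List.countP_cons, List.length_cons, e1, e2, PySem.Dict.mk.injEq,
          List.cons.injEq, Prod.mk.injEq, true_and, and_true]
        refine ⟨by push_cast; ring, by push_cast; ring, by push_cast; ring⟩

-- ===== VERDICT (by name: the statement is the Claim_ definition above) =====
theorem build_status_summary_spec : Claim_equal_build_status_summary := by
  intro runs _
  simp only [Spec_build_status_summary, build_status_summary, build_status_summary_alt, pvSum_init]
  rw [pvLoop]
  simp [pvSum]
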